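-- pv_equiv track=rewrite | github.com/kentosoccer0502/study-notes | journal/2025/10/practice_codes/characterLocation.py | characterLocation
-- ===== SOURCE A (Python) =====
-- from typing import List, Dict
--
-- command_rule: Dict[str, List[int]] = {
--     "N": [0, 1],
--     "E": [1, 0],
--     "W": [-1, 0],
--     "S": [0, -1],
-- }
--
-- def characterLocation(commands: str) -> List[int]:
--     current_loc: List[int] = [0, 0]
--     for c in commands:
--         if c in command_rule:
--             move = command_rule[c]
--             current_loc[0] += move[0]
--             current_loc[1] += move[1]
--     return current_loc
-- ===== SOURCE B (Python) =====
-- def characterLocation(commands: str):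
--     return [commands.count("E") - commands.count("W"),
--             commands.count("N") - commands.count("S")]
-- ===== Notes on version B (the rewrite author's own statement) =====
-- stated objective: faster
-- what changed: Replaces the step-by-step walk (running [x,y] accumulator updated via a dict lookup per character) by a closed form: each coordinate is a difference of two str.count tallies.
import Mathlib
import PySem

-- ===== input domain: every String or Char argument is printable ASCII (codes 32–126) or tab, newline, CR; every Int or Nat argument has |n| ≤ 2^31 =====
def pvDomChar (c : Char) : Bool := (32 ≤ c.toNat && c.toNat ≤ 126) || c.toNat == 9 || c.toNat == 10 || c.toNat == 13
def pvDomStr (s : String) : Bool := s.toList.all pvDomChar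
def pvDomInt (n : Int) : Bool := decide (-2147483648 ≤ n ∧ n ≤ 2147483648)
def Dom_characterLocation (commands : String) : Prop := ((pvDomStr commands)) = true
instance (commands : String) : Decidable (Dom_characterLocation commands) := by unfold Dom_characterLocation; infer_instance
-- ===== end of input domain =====

-- B replaces A's running-accumulator walk by a closed form over character counts (objective: simpler).
-- ===== PORT A =====
-- the module-level dict `command_rule`; single-character string keys ported as Char (the loop variable of `for c in commands` is a code point)
def commandRule : PySem.Dict Char (List Int) :=
  PySem.Dict.ofList [('N', [0, 1]), ('E', [1, 0]), ('W', [-1, 0]), ('S', [0, -1])]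

-- one iteration of A's loop body; `current_loc[i] += move[i]` via pyGetD (indices 0,1 always in range of the 2-element lists)
def chStep (loc : List Int) (c : Char) : List Int :=
  if commandRule.contains c then
    match commandRule.get? c with
    | some move =>
        [PySem.List.pyGetD loc 0 0 + PySem.List.pyGetD move 0 0,
         PySem.List.pyGetD loc 1 0 + PySem.List.pyGetD move 1 0]
    | none => loc
  else loc

def characterLocation (commands : String) : List Int :=
  commands.toList.foldl chStep [0, 0]

-- ===== PORT B =====
def characterLocation_alt (commands : String) : List Int :=
  [(PySem.Str.count commands "E" : Int) - (PySem.Str.count commands "W" : Int),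
   (PySem.Str.count commands "N" : Int) - (PySem.Str.count commands "S" : Int)]

-- ===== PRECONDITION & SPEC =====
def Spec_characterLocation (commands : String) (out : List Int) : Prop := out = characterLocation_alt commands
instance (commands : String) (out : List Int) : Decidable (Spec_characterLocation commands out) := by unfold Spec_characterLocation; infer_instance

-- ===== CLAIM (what is proved, stated in full; the proofs are below) =====
def Claim_equal_characterLocation : Prop := ∀ (commands : String), Dom_characterLocation commands → Spec_characterLocation commands (characterLocation commands)

-- ===== LEMMAS AND PROOFS =====

theorem commandRule_eq :
    commandRule = PySem.Dict.mk [('N', [0, 1]), ('E', [1, 0]), ('W', [-1, 0]), ('S', [0, -1])] := by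
  decide

theorem count_go_singleton (c : Char) (l : List Char) (n acc : Nat) (h : l.length <= n) :
    PySem.Chars.count.go [c] n l acc = acc + l.count c := by
  induction l generalizing n acc with
  | nil => cases n <;> simp [PySem.Chars.count.go]
  | cons hd t ih =>
    cases n with
    | zero => simp at h
    | succ m =>
      simp only [List.length_cons, Nat.succ_le_succ_iff] at h
      by_cases hc : hd = c
      · subst hc
        simp [PySem.Chars.count.go, List.isPrefixOf, ih _ _ h]
        omega
      · simp [PySem.Chars.count.go, List.isPrefixOf, hc, ih _ _ h, Ne.symm hc]

theorem str_count_char (s sub : String) (c : Char) (h : sub.toList = [c]) :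
    PySem.Str.count s sub = s.toList.count c := by
  have hne : sub ≠ "" := by
    intro he; rw [he] at h; simp at h
  simp [PySem.Str.count, PySem.Chars.count, h]
  rw [count_go_singleton c s.toList s.length 0 (by simp)]
  simp [List.count]

theorem chStep_N (x y : Int) : chStep [x, y] 'N' = [x + 0, y + 1] := by
  simp [chStep, commandRule_eq, PySem.Dict.get?_mk_cons, PySem.List.pyGetD, PySem.List.pyGet?, PySem.List.pyIdx?]

theorem chStep_E (x y : Int) : chStep [x, y] 'E' = [x + 1, y + 0] := by
  simp [chStep, commandRule_eq, PySem.Dict.get?_mk_cons, PySem.List.pyGetD, PySem.List.pyGet?, PySem.List.pyIdx?]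

theorem chStep_W (x y : Int) : chStep [x, y] 'W' = [x + (-1), y + 0] := by
  simp [chStep, commandRule_eq, PySem.Dict.get?_mk_cons, PySem.List.pyGetD, PySem.List.pyGet?, PySem.List.pyIdx?]

theorem chStep_S (x y : Int) : chStep [x, y] 'S' = [x + 0, y + (-1)] := by
  simp [chStep, commandRule_eq, PySem.Dict.get?_mk_cons, PySem.List.pyGetD, PySem.List.pyGet?, PySem.List.pyIdx?]

theorem chStep_other (x y : Int) (c : Char)
    (h1 : c ≠ 'N') (h2 : c ≠ 'E') (h3 : c ≠ 'W') (h4 : c ≠ 'S') :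
    chStep [x, y] c = [x, y] := by
  simp [chStep, commandRule_eq, Ne.symm h1, Ne.symm h2, Ne.symm h3, Ne.symm h4]

theorem foldl_chStep (l : List Char) (x y : Int) :
    l.foldl chStep [x, y] =
      [x + ((l.count 'E' : Int) - (l.count 'W' : Int)),
       y + ((l.count 'N' : Int) - (l.count 'S' : Int))] := by
  induction l generalizing x y with
  | nil => simp
  | cons c t ih =>
    by_cases h1 : c = 'N'
    · subst h1
      rw [List.foldl_cons, chStep_N, ih]
      simp
      ring
    by_cases h2 : c = 'E'
    · subst h2
      rw [List.foldl_cons, chStep_E, ih]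
      simp
      ring
    by_cases h3 : c = 'W'
    · subst h3
      rw [List.foldl_cons, chStep_W, ih]
      simp
      ring
    by_cases h4 : c = 'S'
    · subst h4
      rw [List.foldl_cons, chStep_S, ih]
      simp
      ring
    rw [List.foldl_cons, chStep_other x y c h1 h2 h3 h4, ih]
    simp [h1, h2, h3, h4]


-- ===== VERDICT (by name: the statement is the Claim_ definition above) =====
theorem characterLocation_spec : Claim_equal_characterLocation := by
  intro commands _
  unfold Spec_characterLocation characterLocation characterLocation_alt
  rw [foldl_chStep,
      str_count_char commands "E" 'E' (by decide), str_count_char commands "W" 'W' (by decide),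
      str_count_char commands "N" 'N' (by decide), str_count_char commands "S" 'S' (by decide)]
  simp
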